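-- pv_equiv track=rewrite | github.com/rfire12/Quine-McCluskey-Algorithm | main.py | agroup
-- ===== SOURCE A (Python) =====
-- def agroup(minterms):
--     groups = {}
--     for number in minterms:
--         key = number.count('1')
--         if key not in groups:
--             groups[key] = []
--         groups[key].append(number)
--     return groups
-- ===== SOURCE B (Python) =====
-- def agroup(minterms):
--     keys = list(dict.fromkeys(m.count('1') for m in minterms))
--     return {k: [m for m in minterms if m.count('1') == k] for k in keys}
-- ===== Notes on version B (the rewrite author's own statement) =====
-- stated objective: alternative
-- what changed: Replaces the single-pass dict bucketing (membership test, seed-with-[], append per element) with a two-phase plan: dedup the count-of-'1' keys in first-appearance order, then build each bucket by a per-key filter comprehension.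
import Mathlib
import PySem

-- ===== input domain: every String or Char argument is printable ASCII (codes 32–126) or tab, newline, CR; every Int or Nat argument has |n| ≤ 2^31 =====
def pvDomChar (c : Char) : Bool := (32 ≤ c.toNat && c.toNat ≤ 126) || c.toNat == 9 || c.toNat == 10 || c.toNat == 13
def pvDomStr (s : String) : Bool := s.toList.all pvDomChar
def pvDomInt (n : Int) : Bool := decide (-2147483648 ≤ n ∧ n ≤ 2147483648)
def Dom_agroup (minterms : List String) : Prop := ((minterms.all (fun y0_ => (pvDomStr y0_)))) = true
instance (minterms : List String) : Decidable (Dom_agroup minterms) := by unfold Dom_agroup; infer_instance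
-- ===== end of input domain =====

-- B replaces A's single-pass dict bucketing with a dedup-the-keys-then-filter-per-key decomposition (alternative algorithm, same result).


-- ===== PORT A =====
-- groups = {}; for number: key = number.count('1'); if key not in groups: groups[key] = []; groups[key].append(number); return groups
def agroup (minterms : List String) : List (Int × List String) :=
  (minterms.foldl (fun groups number =>
      let key : Int := PySem.Str.count number "1"
      let groups := if groups.contains key then groups else groups.insert key []
      groups.modify key [] (fun l => l ++ [number]))
    PySem.Dict.empty).items

-- ===== PORT B =====
-- keys = list(dict.fromkeys(m.count('1') for m in minterms)); return {k: [m for m in minterms if m.count('1') == k] for k in keys}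
def agroup_alt (minterms : List String) : List (Int × List String) :=
  let keys := PySem.List.dedup (minterms.map (fun m => (PySem.Str.count m "1" : Int)))
  keys.map (fun k => (k, minterms.filter (fun m => ((PySem.Str.count m "1" : Int) == k))))

-- ===== PRECONDITION & SPEC =====
def Spec_agroup (minterms : List String) (out : List (Int × List String)) : Prop := out = agroup_alt minterms
instance (minterms : List String) (out : List (Int × List String)) : Decidable (Spec_agroup minterms out) := by unfold Spec_agroup; infer_instance

-- ===== CLAIM (what is proved, stated in full; the proofs are below) =====
def Claim_equal_agroup : Prop := ∀ (minterms : List String), Dom_agroup minterms → Spec_agroup minterms (agroup minterms)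

-- ===== LEMMAS AND PROOFS =====

-- Seeding an absent key with [] and then modifying it is the same Dict as a direct modify with default [].
lemma bodyA_eq_modify (d : PySem.Dict Int (List String)) (k : Int) (n : String) :
    (if d.contains k then d else d.insert k []).modify k [] (fun l => l ++ [n])
      = d.modify k [] (fun l => l ++ [n]) := by
  by_cases h : d.contains k
  · simp [h]
  · simp only [Bool.not_eq_true] at h
    simp [h, PySem.Dict.modify, PySem.Dict.getD_insert_self, PySem.Dict.insert_insert_self,
      PySem.Dict.getD_of_not_contains d ([] : List String) h]

-- A's loop body, with its lets beta-reduced, is exactly a modify with default [].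
lemma foldA_eq (l : List String) (d : PySem.Dict Int (List String)) :
    l.foldl (fun groups number =>
      let key : Int := PySem.Str.count number "1"
      let groups := if groups.contains key then groups else groups.insert key []
      groups.modify key [] (fun l => l ++ [number])) d
      = l.foldl (fun groups number =>
          groups.modify ((PySem.Str.count number "1" : Int)) [] (fun l => l ++ [number])) d := by
  simp only [bodyA_eq_modify]

-- Items of a dict with Nodup keys are its keys paired with their getD values.
lemma items_eq_keys_map (d : PySem.Dict Int (List String)) (d0 : List String)
    (h : d.keys.Nodup) : d.items = d.keys.map (fun k => (k, d.getD k d0)) := by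
  simp only [PySem.Dict.keys, List.map_map]
  nth_rewrite 1 [show d.items = d.items.map id from (List.map_id _).symm]
  apply List.map_congr_left
  intro p hp
  have h2 : d.getD p.1 d0 = p.2 := PySem.Dict.getD_of_mem_items d (by simpa using hp) h d0
  simp [Function.comp, h2]

-- The modify-fold's items are the deduped keys paired with the per-key filters.
lemma fold_items_eq (minterms : List String) :
    (minterms.foldl (fun groups number =>
        groups.modify ((PySem.Str.count number "1" : Int)) [] (fun l => l ++ [number]))
      PySem.Dict.empty).items
    = (PySem.List.dedup (minterms.map (fun m => (PySem.Str.count m "1" : Int)))).map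
        (fun k => (k, minterms.filter (fun m => ((PySem.Str.count m "1" : Int) == k)))) := by
  set key : String → Int := fun m => (PySem.Str.count m "1" : Int) with hkey
  set d := minterms.foldl (fun groups number =>
      groups.modify (key number) [] (fun l => l ++ [number])) PySem.Dict.empty with hd
  have hkeys : d.keys = PySem.Set.ofList (minterms.map key) := by
    rw [hd, PySem.Dict.keys_foldl_modify_key]
    rfl
  have hnodup : d.keys.Nodup := by
    rw [hd]
    exact PySem.Dict.nodup_keys_foldl_modify_key _ _ _ _ _ (by simp [PySem.Dict.keys_empty])
  have hget : ∀ c, d.getD c [] = minterms.filter (fun m => key m == c) := by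
    intro c
    have hfold : d = (minterms.map (fun m => (key m, m))).foldl
        (fun d p => d.modify p.1 [] (fun l => l ++ [p.2])) PySem.Dict.empty := by
      rw [hd, List.foldl_map]
    rw [hfold, PySem.Dict.getD_foldl_modify_append]
    simp only [List.filter_map, Function.comp_def]
    simp [Function.comp_def]
  rw [items_eq_keys_map d [] hnodup, hkeys]
  simp only [PySem.List.dedup_eq_ofList]
  apply List.map_congr_left
  intro k _
  rw [hget]

-- ===== VERDICT (by name: the statement is the Claim_ definition above) =====
theorem agroup_spec : Claim_equal_agroup := by
  intro minterms _
  unfold Spec_agroup agroup agroup_alt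
  rw [foldA_eq, fold_items_eq]
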